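-- pv_equiv track=rewrite | github.com/chmandzhiev/Codewars | 4.py | solution
-- ===== SOURCE A (Python) =====
-- def solution(string, ending):
--     string_list = list(string)
--     ending_list = list(ending)
--
--     z = 0
--
--     string_list.reverse()
--     ending_list.reverse()
--
--     if len(ending_list) <= len(string_list):
--         for i in range(len(ending_list)):
--             if ending_list[i] == string_list[i]:
--                 z +=1
--     else:
--         return False
--
--     if ending == "":
--         return True
--     elif z == len(ending_list):
--         return True
--     else:
--         return False
-- ===== SOURCE B (Python) =====
-- def solution(string, ending):
--     if len(ending) > len(string):
--         return False
--     return string[len(string) - len(ending):] == ending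
-- ===== Notes on version B (the rewrite author's own statement) =====
-- stated objective: simpler
-- what changed: Replaced the list-conversion/double-reverse/index-loop match counter with a length guard plus a single tail-slice comparison.
import Mathlib
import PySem

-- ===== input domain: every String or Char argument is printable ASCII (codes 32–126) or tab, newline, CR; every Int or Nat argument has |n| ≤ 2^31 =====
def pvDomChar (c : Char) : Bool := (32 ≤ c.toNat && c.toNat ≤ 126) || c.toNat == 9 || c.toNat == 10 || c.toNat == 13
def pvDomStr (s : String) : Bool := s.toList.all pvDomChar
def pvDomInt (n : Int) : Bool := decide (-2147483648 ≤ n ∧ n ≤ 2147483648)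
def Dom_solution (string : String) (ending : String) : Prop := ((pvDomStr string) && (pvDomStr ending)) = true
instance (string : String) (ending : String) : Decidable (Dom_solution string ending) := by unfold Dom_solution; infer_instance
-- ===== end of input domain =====

-- B replaces A's list conversions, double reverse and index-loop match counter by a
-- length guard plus one tail-slice comparison (objective: simpler).

-- ===== PORT A =====
def solution (string : String) (ending : String) : Bool :=
  let string_list := string.toList
  let ending_list := ending.toList
  let z : Int := 0
  let string_list := string_list.reverse
  let ending_list := ending_list.reverse
  if ending_list.length ≤ string_list.length then
    let z := (PySem.List.pyRange 0 (PySem.List.len ending_list)).foldl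
      (fun z i =>
        if PySem.List.pyGetD ending_list i ' ' == PySem.List.pyGetD string_list i ' '
        then z + 1 else z) z
    if ending == "" then true
    else if z == (PySem.List.len ending_list) then true
    else false
  else false

-- ===== PORT B =====
def solution_alt (string : String) (ending : String) : Bool :=
  if PySem.Str.len ending > PySem.Str.len string then false
  else PySem.Str.slice string (some (PySem.Str.len string - PySem.Str.len ending)) none == ending

-- ===== PRECONDITION & SPEC =====
def Spec_solution (string : String) (ending : String) (out : Bool) : Prop := out = solution_alt string ending
instance (string : String) (ending : String) (out : Bool) : Decidable (Spec_solution string ending out) := by unfold Spec_solution; infer_instance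

-- ===== CLAIM (what is proved, stated in full; the proofs are below) =====
def Claim_equal_solution : Prop := ∀ (string : String) (ending : String), Dom_solution string ending → Spec_solution string ending (solution string ending)

-- ===== LEMMAS AND PROOFS =====

-- The match counter reaches len(ending) iff the reversed ending is a pointwise prefix
-- of the reversed string, i.e. iff ending is a suffix of string.
theorem count_eq_iff_suffix (e s : List Char) (h : e.length ≤ s.length) :
    (List.countP (fun i => PySem.List.pyGetD e.reverse i ' ' == PySem.List.pyGetD s.reverse i ' ')
        (PySem.List.pyRange 0 (PySem.List.len e.reverse)) = e.length)
    ↔ e <:+ s := by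
  rw [PySem.List.len_eq, PySem.List.pyRange_zero_natCast, List.countP_map]
  have hlen : e.reverse.length ≤ s.reverse.length := by simpa using h
  constructor
  · intro hc
    rw [← List.reverse_prefix, List.prefix_iff_eq_take]
    have hc' : ∀ i ∈ List.range e.reverse.length,
        ((fun i => PySem.List.pyGetD e.reverse i ' ' == PySem.List.pyGetD s.reverse i ' ') ∘
          (fun k : ℕ => (k : Int))) i = true := by
      apply List.countP_eq_length.mp
      simpa using hc
    apply List.ext_getElem (by simp; omega)
    intro i h1 h2
    have := hc' i (by simpa using h1)
    simp only [Function.comp, PySem.List.pyGetD_natCast, beq_iff_eq] at this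
    rw [List.getD_eq_getElem _ _ h1, List.getD_eq_getElem _ _ (lt_of_lt_of_le h1 hlen)] at this
    rw [List.getElem_take]
    exact this
  · intro hsuf
    have hpre : e.reverse <+: s.reverse := List.reverse_prefix.mpr hsuf
    have hall : ∀ i ∈ List.range e.reverse.length,
        ((fun i => PySem.List.pyGetD e.reverse i ' ' == PySem.List.pyGetD s.reverse i ' ') ∘
          (fun k : ℕ => (k : Int))) i = true := by
      intro i hi
      simp only [List.mem_range] at hi
      simp only [Function.comp_apply, PySem.List.pyGetD_natCast, beq_iff_eq]
      rw [List.getD_eq_getElem _ _ hi, List.getD_eq_getElem _ _ (lt_of_lt_of_le hi hlen)]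
      exact hpre.getElem hi
    have := List.countP_eq_length.mpr hall
    simpa using this

theorem solution_eq_decide (string ending : String) :
    solution string ending = decide (ending.toList <:+ string.toList) := by
  unfold solution
  simp only [List.length_reverse]
  by_cases h : ending.toList.length ≤ string.toList.length
  · rw [if_pos h]
    rw [PySem.List.foldl_count_if
      (fun i => PySem.List.pyGetD ending.toList.reverse i ' ' == PySem.List.pyGetD string.toList.reverse i ' ')]
    by_cases he : ending = ""
    · subst he
      simp [List.nil_suffix]
    · rw [if_neg (by simpa using he)]
      have hz := count_eq_iff_suffix ending.toList string.toList h
      by_cases hc : ending.toList <:+ string.toList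
      · rw [decide_eq_true hc]
        have := hz.mpr hc
        rw [if_pos]
        simp only [PySem.List.len_eq, List.length_reverse, zero_add, beq_iff_eq] at this ⊢
        exact_mod_cast this
      · rw [decide_eq_false hc]
        rw [if_neg]
        simp only [PySem.List.len_eq, List.length_reverse, zero_add, beq_iff_eq] at hz ⊢
        intro hzz
        exact hc (hz.mp (by exact_mod_cast hzz))
  · rw [if_neg h, decide_eq_false]
    intro hsuf
    exact h (by simpa using hsuf.length_le)

theorem solution_alt_eq_decide (string ending : String) :
    solution_alt string ending = decide (ending.toList <:+ string.toList) := by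
  unfold solution_alt
  simp only [PySem.Str.len_eq]
  by_cases h : ending.toList.length ≤ string.toList.length
  · rw [if_neg (by omega)]
    have hslice : (PySem.Str.slice string (some ((string.toList.length : Int) - (ending.toList.length : Int))) none).toList
        = string.toList.drop (string.toList.length - ending.toList.length) := by
      rw [PySem.Str.toList_slice, PySem.Chars.slice_eq_listSlice,
        PySem.List.slice_from _ (by omega)]
      congr 1
      omega
    have : (PySem.Str.slice string (some ((string.toList.length : Int) - (ending.toList.length : Int))) none = ending)
        ↔ ending.toList <:+ string.toList := by
      rw [← String.toList_inj, hslice, List.suffix_iff_eq_drop, eq_comm]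
    rw [Bool.beq_eq_decide_eq]
    exact decide_eq_decide.mpr this
  · rw [if_pos (by omega), decide_eq_false]
    intro hsuf
    exact h (by simpa using hsuf.length_le)

-- ===== VERDICT (by name: the statement is the Claim_ definition above) =====
theorem solution_spec : Claim_equal_solution := by
  intro string ending _
  unfold Spec_solution
  rw [solution_eq_decide, solution_alt_eq_decide]
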